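-- pv_equiv track=rewrite | github.com/napierson/AoC-2017 | Day 4/day4.py | is_extra_valid
-- ===== SOURCE A (Python) =====
-- def is_extra_valid(phrase):
-- 	wordpile = []
-- 	for word in phrase:
-- 		sortedword = list(word)
-- 		sortedword.sort()
-- 		sortedword = ''.join(sortedword)
-- 		if sortedword in wordpile:
-- 			return False
-- 		else:
-- 			wordpile.append(sortedword)
-- 	return True
-- ===== SOURCE B (Python) =====
-- def is_extra_valid(phrase):
--     # Anagram check via character-frequency dicts (no sorting): two words are
--     # anagrams iff their letter-count dicts are equal; scan all pairs.
--     counters = []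
--     for word in phrase:
--         c = {}
--         for ch in word:
--             c[ch] = c.get(ch, 0) + 1
--         counters.append(c)
--     while counters:
--         first = counters.pop(0)
--         for other in counters:
--             if first == other:
--                 return False
--     return True
-- ===== Notes on version B (the rewrite author's own statement) =====
-- stated objective: alternative
-- what changed: B detects anagram pairs by building a character-frequency dict per word (no sorting at all) and comparing all pairs of dicts, instead of A's sort-each-word canonical strings accumulated in a membership pile with early return on the first repeat.
import Mathlib
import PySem

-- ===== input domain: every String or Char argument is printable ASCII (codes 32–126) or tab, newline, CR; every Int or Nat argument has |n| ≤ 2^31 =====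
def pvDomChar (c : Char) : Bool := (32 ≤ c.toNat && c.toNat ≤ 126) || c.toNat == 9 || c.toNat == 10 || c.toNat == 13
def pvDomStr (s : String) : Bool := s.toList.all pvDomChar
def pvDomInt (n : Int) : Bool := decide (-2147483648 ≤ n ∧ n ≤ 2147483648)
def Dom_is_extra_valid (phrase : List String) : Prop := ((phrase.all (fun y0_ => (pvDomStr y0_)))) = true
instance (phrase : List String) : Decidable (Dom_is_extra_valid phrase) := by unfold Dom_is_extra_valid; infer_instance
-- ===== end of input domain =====

-- B detects anagrams with character-frequency dicts and an all-pairs scan instead of A's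
-- sort-each-word canonical forms kept in a membership pile; objective: alternative.

-- ===== PORT A =====
-- sortedword = ''.join(sorted(list(word)))
def pvCanon (word : String) : String :=
  String.ofList (PySem.List.sorted word.toList (fun c => c) false)

-- A's loop: keep a pile of seen canonical forms, return False on first repeat
def pvLoopA : List String → List String → Bool
  | [], _ => true
  | word :: rest, wordpile =>
    let sortedword := pvCanon word
    if sortedword ∈ wordpile then false
    else pvLoopA rest (wordpile ++ [sortedword])

def is_extra_valid (phrase : List String) : Bool := pvLoopA phrase []

-- ===== PORT B =====
-- c = {}; for ch in word: c[ch] = c.get(ch, 0) + 1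
def pvCount (word : String) : PySem.Dict Char Int :=
  word.toList.foldl (fun d ch => d.insert ch (d.getD ch 0 + 1)) PySem.Dict.empty

-- Python's `d1 == d2` on dicts: same key→value mapping, insertion order ignored
def pvDictEq (d1 d2 : PySem.Dict Char Int) : Bool :=
  d1.items.all (fun kv => d2.get? kv.1 == some kv.2) &&
  d2.items.all (fun kv => d1.get? kv.1 == some kv.2)

-- while counters: first = counters.pop(0); for other in counters: if first == other: return False
def pvPairScan : List (PySem.Dict Char Int) → Bool
  | [] => true
  | first :: rest =>
    if rest.any (fun other => pvDictEq first other) then false else pvPairScan rest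

def is_extra_valid_alt (phrase : List String) : Bool :=
  pvPairScan (phrase.map pvCount)

-- ===== PRECONDITION & SPEC =====
def Spec_is_extra_valid (phrase : List String) (out : Bool) : Prop := out = is_extra_valid_alt phrase
instance (phrase : List String) (out : Bool) : Decidable (Spec_is_extra_valid phrase out) := by unfold Spec_is_extra_valid; infer_instance

-- ===== CLAIM (what is proved, stated in full; the proofs are below) =====
def Claim_equal_is_extra_valid : Prop := ∀ (phrase : List String), Dom_is_extra_valid phrase → Spec_is_extra_valid phrase (is_extra_valid phrase)

-- ===== LEMMAS AND PROOFS =====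

-- A's loop returns true iff the remaining canonical forms are pairwise distinct and avoid the pile.
theorem pvLoopA_iff (ws pile : List String) :
    pvLoopA ws pile = true ↔ ((ws.map pvCanon).Nodup ∧ ∀ k ∈ ws.map pvCanon, k ∉ pile) := by
  induction ws generalizing pile with
  | nil => simp [pvLoopA]
  | cons w rest ih =>
    simp only [pvLoopA, List.map_cons, List.nodup_cons]
    by_cases h : pvCanon w ∈ pile
    · simp only [if_pos h]
      constructor
      · intro hfalse; simp at hfalse
      · rintro ⟨_, hall⟩
        exact absurd h (hall _ (List.mem_cons_self))
    · simp only [if_neg h, ih]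
      constructor
      · rintro ⟨hn, hall⟩
        have hmem : ∀ k ∈ rest.map pvCanon, k ∉ pile ∧ k ≠ pvCanon w := by
          intro k hk
          have := hall k hk
          simp only [List.mem_append, List.mem_singleton] at this
          exact ⟨fun hc => this (Or.inl hc), fun hc => this (Or.inr hc)⟩
        refine ⟨⟨fun hc => (hmem _ hc).2 rfl, hn⟩, ?_⟩
        intro k hk
        rcases List.mem_cons.mp hk with h1 | h2
        · subst h1; exact h
        · exact (hmem _ h2).1
      · rintro ⟨⟨hnw, hn⟩, hall⟩
        refine ⟨hn, ?_⟩
        intro k hk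
        simp only [List.mem_append, List.mem_singleton]
        rintro (hc | hc)
        · exact hall k (List.mem_cons_of_mem _ hk) hc
        · subst hc; exact hnw hk

-- B's count loop is collections.Counter
theorem pvCount_eq_counter (word : String) :
    pvCount word = PySem.Dict.counter word.toList :=
  PySem.Dict.foldl_insert_getD_add_one_eq_counter word.toList

-- lookup in a counter
theorem get?_counter (xs : List Char) (c : Char) :
    (PySem.Dict.counter xs).get? c = if xs.count c = 0 then none else some ((xs.count c : Int)) := by
  by_cases hm : c ∈ xs
  · have hc0 : xs.count c ≠ 0 := by
      simpa [Nat.pos_iff_ne_zero] using List.count_pos_iff.mpr hm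
    rw [if_neg hc0]
    have hcont : (PySem.Dict.counter xs).contains c = true := by
      rw [PySem.Dict.contains_counter]; simpa using hm
    rw [PySem.Dict.contains_eq_isSome_get?] at hcont
    rcases Option.isSome_iff_exists.mp hcont with ⟨v, hv⟩
    have := PySem.Dict.getD_counter xs c
    rw [PySem.Dict.getD_eq_get?_getD, hv] at this
    simp only [Option.getD_some] at this
    rw [hv, this]
  · have hc0 : xs.count c = 0 := List.count_eq_zero.mpr hm
    rw [if_pos hc0]
    have hcont : (PySem.Dict.counter xs).contains c = false := by
      rw [PySem.Dict.contains_counter]; simpa using hm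
    exact (PySem.Dict.get?_eq_none_iff_contains _ _).mpr hcont

-- Python dict equality of two counters = equality of all character counts
theorem pvDictEq_counter_iff (a b : List Char) :
    pvDictEq (PySem.Dict.counter a) (PySem.Dict.counter b) = true ↔
      ∀ c, a.count c = b.count c := by
  unfold pvDictEq
  simp only [Bool.and_eq_true, List.all_eq_true, PySem.Dict.items_counter, List.mem_map,
    beq_iff_eq]
  constructor
  · rintro ⟨h1, h2⟩ c
    by_cases hca : c ∈ a
    · have := h1 (c, (a.count c : Int)) ⟨c, by simpa [PySem.Set.mem_ofList] using hca, rfl⟩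
      rw [get?_counter] at this
      split_ifs at this with h
      simp at this
      omega
    · have ha0 : a.count c = 0 := List.count_eq_zero.mpr hca
      by_cases hcb : c ∈ b
      · have := h2 (c, (b.count c : Int)) ⟨c, by simpa [PySem.Set.mem_ofList] using hcb, rfl⟩
        rw [get?_counter] at this
        split_ifs at this with h
      · rw [ha0, List.count_eq_zero.mpr hcb]
  · intro h
    constructor
    · rintro ⟨k, v⟩ ⟨c, hc, hck⟩
      obtain ⟨rfl, rfl⟩ := Prod.mk.injEq .. ▸ hck
      have hca : c ∈ a := by simpa [PySem.Set.mem_ofList] using hc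
      have hc0 : a.count c ≠ 0 := by
        simpa [Nat.pos_iff_ne_zero] using List.count_pos_iff.mpr hca
      rw [get?_counter, if_neg (by rw [← h c]; exact hc0)]
      simp [h c]
    · rintro ⟨k, v⟩ ⟨c, hc, hck⟩
      obtain ⟨rfl, rfl⟩ := Prod.mk.injEq .. ▸ hck
      have hcb : c ∈ b := by simpa [PySem.Set.mem_ofList] using hc
      have hc0 : b.count c ≠ 0 := by
        simpa [Nat.pos_iff_ne_zero] using List.count_pos_iff.mpr hcb
      rw [get?_counter, if_neg (by rw [h c]; exact hc0)]
      simp [h c]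

-- counters equal (as Python dicts) iff the sorted canonical strings are equal
theorem pvDictEq_iff_canon (w1 w2 : String) :
    pvDictEq (pvCount w1) (pvCount w2) = true ↔ pvCanon w1 = pvCanon w2 := by
  rw [pvCount_eq_counter, pvCount_eq_counter, pvDictEq_counter_iff]
  have hperm : (∀ c, w1.toList.count c = w2.toList.count c) ↔ w1.toList.Perm w2.toList :=
    (List.perm_iff_count).symm
  rw [hperm, ← PySem.List.sorted_id_eq_sorted_id_iff_perm]
  unfold pvCanon
  constructor
  · intro h; rw [h]
  · intro h
    have := congrArg String.toList h
    simpa using this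

-- B's pair scan returns true iff no two counters are Python-equal
theorem pvPairScan_iff (cs : List (PySem.Dict Char Int)) :
    pvPairScan cs = true ↔ cs.Pairwise (fun a b => pvDictEq a b = false) := by
  induction cs with
  | nil => simp [pvPairScan]
  | cons c rest ih =>
    simp only [pvPairScan, List.pairwise_cons]
    by_cases h : rest.any (fun other => pvDictEq c other) = true
    · rw [if_pos h]
      simp only [List.any_eq_true] at h
      obtain ⟨d, hd, hde⟩ := h
      constructor
      · intro hfalse; simp at hfalse
      · rintro ⟨hall, _⟩
        rw [hall d hd] at hde; simp at hde
    · rw [if_neg h, ih]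
      simp only [List.any_eq_true, not_exists, not_and] at h
      constructor
      · intro hp
        refine ⟨fun d hd => ?_, hp⟩
        have := h d hd
        simpa [Bool.not_eq_true] using this
      · rintro ⟨_, hp⟩; exact hp

-- ===== VERDICT (by name: the statement is the Claim_ definition above) =====
theorem is_extra_valid_spec : Claim_equal_is_extra_valid := by
  intro phrase _
  unfold Spec_is_extra_valid
  have hA : is_extra_valid phrase = true ↔ (phrase.map pvCanon).Nodup := by
    unfold is_extra_valid
    rw [pvLoopA_iff]
    simp
  have hB : is_extra_valid_alt phrase = true ↔ (phrase.map pvCanon).Nodup := by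
    unfold is_extra_valid_alt
    rw [pvPairScan_iff, List.pairwise_map, List.Nodup, List.pairwise_map]
    constructor <;> intro hp <;> refine hp.imp ?_ <;> intro a b hab
    · intro hce
      rw [(pvDictEq_iff_canon a b).mpr hce] at hab
      simp at hab
    · rw [← Bool.not_eq_true, pvDictEq_iff_canon]
      exact hab
  cases h1 : is_extra_valid phrase <;> cases h2 : is_extra_valid_alt phrase <;>
    simp_all
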